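-- pv_equiv track=rewrite | github.com/surajkareppagol/leetcode-problems | 2017-Grid-Game/main.py | gridGame
-- ===== SOURCE A (Python) =====
-- from typing import List
--
-- def gridGame(grid: List[List[int]]) -> int:
--     rows = len(grid)
--     columns = len(grid[0])
--
--     # ************** CALCULATE ALL MAXIMUM PATHS **************#
--
--     def calculate_cost():
--         paths = {}
--         cost = [0] * columns
--         change_row = 0
--
--         for i in range(columns):
--             row = 0
--             column = 0
--
--             visited = []
--
--             for j in range(columns + 1):
--                 visited.append([row, column])
--                 cost[i] += grid[row][column]
--
--                 if j == change_row:
--                     row += 1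
--                     continue
--
--                 column += 1
--
--             change_row += 1
--
--             paths[i] = visited
--
--         return cost, paths
--
--     # ************** ZERO OUT MAX PATH **************#
--
--     cost, paths = calculate_cost()
--
--     max_path = cost.index(max(cost))
--
--     for i, j in paths[max_path]:
--         grid[i][j] = 0
--
--     # ************** CALCULATE ALL MINIMUM PATHS **************#
--
--     cost, path = calculate_cost()
--     return max(cost)
-- ===== SOURCE B (Python) =====
-- from typing import List
--
-- def gridGame(grid: List[List[int]]) -> int:
--     # O(n) prefix/suffix sums; does not mutate grid (A zeroes the chosen path
--     # in place) -- the equivalence claimed is about the return value.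
--     top = grid[0]
--     c = len(top)
--     bot = grid[1][:c]
--
--     # cost of the path turning down at i is sum(top[:i+1]) + sum(bot[i:]);
--     # track it with running sums and keep the first maximum's index k.
--     pre = 0
--     suf = sum(bot)
--     best = None
--     k = 0
--     for i in range(c):
--         pre += top[i]
--         cost = pre + suf
--         suf -= bot[i]
--         if best is None or cost > best:
--             best = cost
--             k = i
--     # after zeroing path k the remaining turning-path costs are
--     #   0 (path k itself), sum(bot[i:k]) for i < k, sum(top[k+1:i+1]) for i > k
--     ans = 0
--     s = 0
--     for i in range(k - 1, -1, -1):
--         s += bot[i]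
--         if s > ans:
--             ans = s
--     s = 0
--     for i in range(k + 1, c):
--         s += top[i]
--         if s > ans:
--             ans = s
--     return ans
-- ===== Notes on version B (the rewrite author's own statement) =====
-- stated objective: faster
-- what changed: B replaces A's quadratic path enumeration (rebuilding every turning-point path cell by cell, twice, plus a paths dict and in-place zeroing of the grid) with O(n) running prefix/suffix sums: one pass finds the first-max turn index k, then two short running-sum passes compute the best remaining bottom-suffix/top-prefix after the path through k is zeroed; B does not mutate grid (A zeroes the chosen path in place) — the equivalence is about the return value.
import Mathlib
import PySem

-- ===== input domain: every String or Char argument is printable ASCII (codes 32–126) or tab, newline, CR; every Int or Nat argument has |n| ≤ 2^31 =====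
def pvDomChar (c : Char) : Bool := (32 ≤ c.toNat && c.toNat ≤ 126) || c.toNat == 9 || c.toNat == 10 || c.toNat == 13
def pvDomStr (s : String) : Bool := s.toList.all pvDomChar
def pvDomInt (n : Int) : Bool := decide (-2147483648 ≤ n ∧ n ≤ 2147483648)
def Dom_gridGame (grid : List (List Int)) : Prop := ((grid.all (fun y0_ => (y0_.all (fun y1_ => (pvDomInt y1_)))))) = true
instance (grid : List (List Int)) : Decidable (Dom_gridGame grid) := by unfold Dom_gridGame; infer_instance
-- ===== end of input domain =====

-- B replaces A's quadratic cell-by-cell path enumeration with O(n) running prefix/suffix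
-- sums (A also zeroes the chosen path in the input grid in place, B does not mutate it;
-- the equivalence proved is about the return value).


-- ===== PORT A =====
-- body of A's inner 'for j in range(columns + 1)' loop; state = (row, column, visited, cost)
def gridGameStep (grid : List (List Int)) (chg ii : Int)
    (st : Int × Int × List (Int × Int) × List Int) (j : Int) :
    Int × Int × List (Int × Int) × List Int :=
  let visited := st.2.2.1 ++ [(st.1, st.2.1)]
  let cost := PySem.List.pySetD st.2.2.2 ii
      (PySem.List.pyGetD st.2.2.2 ii 0 +
        PySem.List.pyGetD (PySem.List.pyGetD grid st.1 []) st.2.1 0)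
  if j = chg then (st.1 + 1, st.2.1, visited, cost)
  else (st.1, st.2.1 + 1, visited, cost)

-- A's calculate_cost(): outer state = (cost, paths, change_row)
def gridGameCalc (grid : List (List Int)) (columns : Nat) :
    List Int × PySem.Dict Int (List (Int × Int)) :=
  let res := (PySem.List.pyRange 0 (columns : Int) 1).foldl
    (fun acc i =>
      let inner := (PySem.List.pyRange 0 ((columns : Int) + 1) 1).foldl
        (gridGameStep grid acc.2.2 i) (0, 0, [], acc.1)
      (inner.2.2.2, acc.2.1.insert i inner.2.2.1, acc.2.2 + 1))
    (List.replicate columns 0, PySem.Dict.empty, 0)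
  (res.1, res.2.1)

def gridGame (grid : List (List Int)) : Int :=
  let columns := (PySem.List.pyGetD grid 0 []).length
  let cp := gridGameCalc grid columns
  let mx := (PySem.List.max? cp.1 (fun x => x)).getD 0
  let maxPath : Nat := (PySem.List.index? cp.1 mx).getD 0
  let grid2 := (cp.2.getD (maxPath : Int) []).foldl
    (fun g p => PySem.List.pySetD g p.1 (PySem.List.pySetD (PySem.List.pyGetD g p.1 []) p.2 0)) grid
  let cp2 := gridGameCalc grid2 columns
  (PySem.List.max? cp2.1 (fun x => x)).getD 0

-- ===== PORT B =====
def gridGame_alt (grid : List (List Int)) : Int :=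
  let top := PySem.List.pyGetD grid 0 []
  let c := top.length
  let bot := PySem.List.slice (PySem.List.pyGetD grid 1 []) none (some (c : Int))
  let st := (PySem.List.pyRange 0 (c : Int) 1).foldl
    (fun (st : Option Int × Int × Int × Int) i =>
      let pre := st.2.2.1 + PySem.List.pyGetD top i 0
      let cost := pre + st.2.2.2
      let suf := st.2.2.2 - PySem.List.pyGetD bot i 0
      match st.1 with
      | none => (some cost, i, pre, suf)
      | some b => if cost > b then (some cost, i, pre, suf) else (st.1, st.2.1, pre, suf))
    (none, 0, 0, bot.sum)
  let k := st.2.1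
  let a2 := (PySem.List.pyRange (k - 1) (-1) (-1)).foldl
    (fun (st : Int × Int) i =>
      let s := st.2 + PySem.List.pyGetD bot i 0
      (if s > st.1 then s else st.1, s)) (0, 0)
  let a3 := (PySem.List.pyRange (k + 1) (c : Int) 1).foldl
    (fun (st : Int × Int) i =>
      let s := st.2 + PySem.List.pyGetD top i 0
      (if s > st.1 then s else st.1, s)) (a2.1, 0)
  a3.1

-- ===== PRECONDITION & SPEC =====
-- Pre_ excludes exactly the inputs where A raises: fewer than two rows (IndexError on
-- grid[1]), an empty first row (Python's max of an empty list is a ValueError), or a second row shorter than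
-- the first (IndexError while walking the bottom row).
def Pre_gridGame (grid : List (List Int)) : Prop :=
  2 ≤ grid.length ∧ 1 ≤ (grid.getD 0 []).length ∧ (grid.getD 0 []).length ≤ (grid.getD 1 []).length
instance (grid : List (List Int)) : Decidable (Pre_gridGame grid) := by unfold Pre_gridGame; infer_instance
def pvWitness_gridGame : List (List Int) := [[2, 5, 4], [1, 5, 1]]

def Spec_gridGame (grid : List (List Int)) (out : Int) : Prop := out = gridGame_alt grid
instance (grid : List (List Int)) (out : Int) : Decidable (Spec_gridGame grid out) := by unfold Spec_gridGame; infer_instance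

-- ===== CLAIM (what is proved, stated in full; the proofs are below) =====
def Claim_equal_gridGame : Prop := ∀ (grid : List (List Int)), Dom_gridGame grid → Pre_gridGame grid → Spec_gridGame grid (gridGame grid)

-- ===== LEMMAS AND PROOFS =====

-- sum of l.getD over the index window [a, b)
def seg (l : List Int) (a b : Nat) : Int := ((List.range (b - a)).map (fun m => l.getD (a + m) 0)).sum
-- [off, off+1, ..., off+n-1]
def offR (off n : Nat) : List Nat := (List.range n).map (fun j => off + j)
-- cost of the path that turns down at column i
def Fc (t b : List Int) (c i : Nat) : Int := seg t 0 (i + 1) + seg b i c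
-- the visited cells of path i
def pathL (k c : Nat) : List (Int × Int) :=
  (offR 0 (k + 1)).map (fun j : Nat => ((0 : Int), (j : Int))) ++
  (offR k (c - k)).map (fun j : Nat => ((1 : Int), (j : Int)))
-- remaining path costs after path k is zeroed
def Gf (t b : List Int) (k i : Nat) : Int := if i ≤ k then seg b i k else seg t (k + 1) (i + 1)

theorem seg_self (l : List Int) (a : Nat) : seg l a a = 0 := by simp [seg]

theorem seg_succ_right (l : List Int) (a b : Nat) (h : a ≤ b) :
    seg l a (b + 1) = seg l a b + l.getD b 0 := by
  have e : b + 1 - a = (b - a) + 1 := by omega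
  rw [seg, e, List.range_succ]
  simp only [List.map_append, List.map_cons, List.map_nil, List.sum_append, List.sum_cons,
    List.sum_nil, add_zero]
  rw [show a + (b - a) = b by omega]
  rfl

theorem seg_cons (l : List Int) (a b : Nat) (h : a < b) :
    seg l a b = l.getD a 0 + seg l (a + 1) b := by
  have : b - a = (b - (a + 1)) + 1 := by omega
  rw [seg, this, List.range_succ_eq_map]
  simp only [List.map_cons, List.map_map, Function.comp_def, List.sum_cons, add_zero]
  rw [seg]
  congr 1
  refine congrArg List.sum (List.map_congr_left ?_)
  intro m _
  rw [show a + m.succ = a + 1 + m by omega]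

theorem seg_split (l : List Int) (a m b : Nat) (h1 : a ≤ m) (h2 : m ≤ b) :
    seg l a b = seg l a m + seg l m b := by
  obtain ⟨n, rfl⟩ : ∃ n, b = m + n := ⟨b - m, by omega⟩
  induction n with
  | zero => simp [seg_self]
  | succ n ih =>
    rw [show m + (n + 1) = (m + n) + 1 by omega, seg_succ_right l a (m + n) (by omega),
      seg_succ_right l m (m + n) (by omega), ih (by omega)]
    ring

theorem seg_congr (l l' : List Int) (a b : Nat)
    (h : ∀ m, a ≤ m → m < b → l.getD m 0 = l'.getD m 0) : seg l a b = seg l' a b := by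
  unfold seg
  congr 1
  apply List.map_congr_left
  intro m hm
  simp at hm
  exact h (a + m) (by omega) (by omega)

theorem seg_zero_of (l : List Int) (a b : Nat)
    (h : ∀ m, a ≤ m → m < b → l.getD m 0 = 0) : seg l a b = 0 := by
  rw [seg_congr l [] a b (by intro m h1 h2; rw [h m h1 h2]; simp [List.getD])]
  simp [seg, List.getD]

theorem getD_set_zero (l : List Int) (i m : Nat) :
    (l.set i 0).getD m 0 = if m = i then (0 : Int) else l.getD m 0 := by
  by_cases hm : m = i
  · subst hm
    by_cases hl : m < l.length
    · simp [List.getD, List.getElem?_set_self hl]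
    · rw [List.getD, List.getD, List.getElem?_eq_none (l := l.set m 0) (by simpa using hl),
        List.getElem?_eq_none (by simpa using hl)]
      simp
  · rw [List.getD, List.getD, List.getElem?_set_ne (by omega)]
    simp [hm]

theorem getD_set_self (l : List Int) (i : Nat) (v : Int) (h : i < l.length) :
    (l.set i v).getD i 0 = v := by
  simp [List.getD, List.getElem?_set_self h]

theorem set_getD_self (l : List Int) (i : Nat) (h : i < l.length) :
    l.set i (l.getD i 0) = l := by
  apply List.ext_getElem (by simp)
  intro n h1 h2
  by_cases hn : n = i
  · subst hn; simp [List.getD, List.getElem?_eq_getElem h]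
  · rw [List.getElem_set_ne (by omega)]

theorem offR_succ_left (col n : Nat) : offR col (n + 1) = col :: offR (col + 1) n := by
  simp only [offR, List.range_succ_eq_map, List.map_cons, List.map_map, Function.comp_def,
    add_zero]
  congr 1
  apply List.map_congr_left; intro m _; omega

theorem offR_succ_right (off n : Nat) : offR off (n + 1) = offR off n ++ [off + n] := by
  simp [offR, List.range_succ]

-- the no-switch segment of A's inner loop
theorem inner_run (g : List (List Int)) (chg : Int) (iN r : Nat)
    (n : Nat) : ∀ (a col : Nat) (vis : List (Int × Int)) (cost : List Int),
    iN < cost.length →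
    (∀ m : Nat, m < n → ((a + m : Nat) : Int) ≠ chg) →
    (PySem.List.pyRange (a : Int) ((a + n : Nat) : Int) 1).foldl
      (gridGameStep g chg (iN : Int)) ((r : Int), (col : Int), vis, cost)
    = ((r : Int), ((col + n : Nat) : Int),
       vis ++ (offR col n).map (fun j : Nat => ((r : Int), (j : Int))),
       PySem.List.pySetD cost (iN : Int)
         (PySem.List.pyGetD cost (iN : Int) 0 +
           seg (PySem.List.pyGetD g (r : Int) []) col (col + n))) := by
  induction n with
  | zero =>
    intro a col vis cost hlen hav
    rw [show ((a + 0 : Nat) : Int) = (a : Int) by push_cast; ring]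
    rw [PySem.List.pyRange_one_eq_nil le_rfl]
    simp only [List.foldl_nil, offR, List.range_zero, List.map_nil, List.append_nil,
      seg_self, add_zero]
    rw [PySem.List.pySetD_natCast, PySem.List.pyGetD_natCast, set_getD_self cost iN hlen]
  | succ n ih =>
    intro a col vis cost hlen hav
    have h1 : (a : Int) < ((a + (n + 1) : Nat) : Int) := by push_cast; omega
    rw [PySem.List.pyRange_one_cons h1]
    simp only [List.foldl_cons]
    have hne : (a : Int) ≠ chg := by simpa using hav 0 (by omega)
    have hstep : gridGameStep g chg (iN : Int) ((r : Int), (col : Int), vis, cost) (a : Int)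
        = ((r : Int), ((col + 1 : Nat) : Int), vis ++ [((r : Int), (col : Int))],
           (cost.set iN (cost.getD iN 0 +
             (PySem.List.pyGetD g (r : Int) []).getD col 0) : List Int)) := by
      simp only [gridGameStep, if_neg hne, PySem.List.pyGetD_natCast,
        PySem.List.pySetD_natCast]
      push_cast
      rfl
    rw [hstep]
    have h2 : ((a : Int) + 1) = ((a + 1 : Nat) : Int) := by push_cast; ring
    have h3 : ((a + (n + 1) : Nat) : Int) = (((a + 1) + n : Nat) : Int) := by push_cast; ring
    rw [h2, h3, ih (a + 1) (col + 1) _ _ (by simpa using hlen)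
      (fun m hm => by
        have := hav (m + 1) (by omega)
        simpa [show a + (m + 1) = a + 1 + m by omega] using this)]
    have h4 : ((col + 1 + n : Nat) : Int) = ((col + (n + 1) : Nat) : Int) := by push_cast; ring
    rw [h4, offR_succ_left, List.map_cons, List.append_assoc]
    simp only [PySem.List.pySetD_natCast, PySem.List.pyGetD_natCast, List.set_set,
      getD_set_self cost iN _ hlen, List.cons_append, List.nil_append]
    congr 4
    rw [seg_cons _ col (col + (n + 1)) (by omega), show col + (n + 1) = (col + 1) + n by omega]
    ring

-- full characterization of A's inner loop for change_row = i < columns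
theorem inner_spec (t b : List Int) (rest : List (List Int)) (c kN : Nat) (hk : kN < c)
    (cost : List Int) (hlen : cost.length = c) :
    (PySem.List.pyRange 0 ((c : Int) + 1) 1).foldl
      (gridGameStep (t :: b :: rest) (kN : Int) (kN : Int)) (0, 0, [], cost)
    = ((1 : Int), (c : Int), pathL kN c,
       PySem.List.pySetD cost (kN : Int)
         (PySem.List.pyGetD cost (kN : Int) 0 + Fc t b c kN)) := by
  have hsplit : PySem.List.pyRange 0 ((c : Int) + 1) 1
      = PySem.List.pyRange 0 (kN : Int) 1 ++ PySem.List.pyRange (kN : Int) ((c : Int) + 1) 1 :=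
    PySem.List.pyRange_one_append 0 (kN : Int) ((c : Int) + 1) (by positivity) (by omega)
  have hcons : PySem.List.pyRange (kN : Int) ((c : Int) + 1) 1
      = (kN : Int) :: PySem.List.pyRange ((kN : Int) + 1) ((c : Int) + 1) 1 :=
    PySem.List.pyRange_one_cons (by omega)
  rw [hsplit, hcons, List.foldl_append, List.foldl_cons]
  have run1 := inner_run (t :: b :: rest) (kN : Int) kN 0 kN 0 0 [] cost (by omega)
    (fun m hm => by push_cast; omega)
  rw [show ((0:Int), (0:Int), ([] : List (Int × Int)), cost)
      = (((0:Nat) : Int), ((0:Nat) : Int), ([] : List (Int × Int)), cost) from by norm_num,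
    show PySem.List.pyRange 0 (kN : Int) 1
      = PySem.List.pyRange ((0:Nat) : Int) (((0 + kN : Nat)) : Int) 1 from by norm_num,
    run1]
  have hstep : gridGameStep (t :: b :: rest) (kN : Int) (kN : Int)
      (((0:Nat) : Int), ((0 + kN : Nat) : Int),
        [] ++ (offR 0 kN).map (fun j : Nat => (((0:Nat) : Int), (j : Int))),
        PySem.List.pySetD cost ((kN:Nat) : Int)
          (PySem.List.pyGetD cost ((kN:Nat) : Int) 0 +
            seg (PySem.List.pyGetD (t :: b :: rest) ((0:Nat) : Int) []) 0 (0 + kN)))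
      (kN : Int)
      = (((1:Nat) : Int), ((kN : Nat) : Int),
         (offR 0 kN).map (fun j : Nat => ((0 : Int), (j : Int))) ++ [((0 : Int), (kN : Int))],
         (cost.set kN (cost.getD kN 0 + seg t 0 kN + t.getD kN 0) : List Int)) := by
    simp only [gridGameStep, PySem.List.pyGetD_natCast, PySem.List.pySetD_natCast,
      List.set_set, List.nil_append, Nat.zero_add, Nat.cast_zero, Nat.cast_one]
    rw [getD_set_self cost kN _ (by omega)]
    norm_num
  rw [hstep]
  have run2 := inner_run (t :: b :: rest) (kN : Int) kN 1 (c - kN) (kN + 1) kN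
    ((offR 0 kN).map (fun j : Nat => ((0 : Int), (j : Int))) ++ [((0 : Int), (kN : Int))])
    (cost.set kN (cost.getD kN 0 + seg t 0 kN + t.getD kN 0))
    (by simpa using (by omega : kN < cost.length))
    (fun m hm => by push_cast; omega)
  rw [show PySem.List.pyRange ((kN : Int) + 1) ((c : Int) + 1) 1
      = PySem.List.pyRange (((kN + 1 : Nat)) : Int) ((((kN + 1) + (c - kN) : Nat)) : Int) 1 from by
    rw [show (kN + 1) + (c - kN) = c + 1 from by omega]; push_cast; ring_nf, run2]
  simp only [PySem.List.pySetD_natCast, PySem.List.pyGetD_natCast, List.set_set,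
    Nat.cast_one]
  rw [getD_set_self cost kN _ (by omega)]
  simp only [Prod.mk.injEq]
  refine ⟨trivial, by push_cast; omega, ?_, ?_⟩
  · rw [pathL, offR_succ_right, List.map_append, List.append_assoc]
    norm_num
  · congr 1
    rw [Fc, seg_succ_right t 0 kN (by omega)]
    have hb : PySem.List.pyGetD (t :: b :: rest) (1 : Int) [] = b := by
      simpa using PySem.List.pyGetD_natCast (t :: b :: rest) 1 ([] : List Int)
    rw [hb, show kN + (c - kN) = c by omega]
    ring

theorem calc_aux (t b : List Int) (rest : List (List Int)) (c : Nat) :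
    ∀ n : Nat, n ≤ c →
    ∃ d : PySem.Dict Int (List (Int × Int)),
      ((PySem.List.pyRange 0 (n : Int) 1).foldl
        (fun acc i =>
          let inner := (PySem.List.pyRange 0 ((c : Int) + 1) 1).foldl
            (gridGameStep (t :: b :: rest) acc.2.2 i) (0, 0, [], acc.1)
          (inner.2.2.2, acc.2.1.insert i inner.2.2.1, acc.2.2 + 1))
        (List.replicate c 0, PySem.Dict.empty, 0))
      = ((List.range c).map (fun m => if m < n then Fc t b c m else 0), d, (n : Int))
      ∧ ∀ m : Nat, m < n → d.getD (m : Int) [] = pathL m c := by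
  intro n
  induction n with
  | zero =>
    intro _
    refine ⟨PySem.Dict.empty, ?_, by omega⟩
    rw [show ((0 : Nat) : Int) = 0 from rfl, PySem.List.pyRange_one_eq_nil le_rfl]
    simp [List.map_const']
  | succ n ih =>
    intro hn
    obtain ⟨d, heq, hd⟩ := ih (by omega)
    have hsplit : PySem.List.pyRange 0 ((n + 1 : Nat) : Int) 1
        = PySem.List.pyRange 0 (n : Int) 1 ++ [(n : Int)] := by
      rw [show ((n + 1 : Nat) : Int) = (n : Int) + 1 from by push_cast; ring]
      exact PySem.List.pyRange_one_succ_right (by positivity)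
    rw [hsplit, List.foldl_append, heq, List.foldl_cons, List.foldl_nil]
    have hlen : ((List.range c).map (fun m => if m < n then Fc t b c m else 0)).length = c := by
      simp
    have hin := inner_spec t b rest c n (by omega)
      ((List.range c).map (fun m => if m < n then Fc t b c m else 0)) hlen
    simp only [hin]
    have hget : PySem.List.pyGetD
        ((List.range c).map (fun m => if m < n then Fc t b c m else 0)) ((n : Nat) : Int) 0
        = 0 := by
      rw [PySem.List.pyGetD_natCast, List.getD, List.getElem?_map,
        List.getElem?_range (by omega : n < c)]
      simp
    refine ⟨d.insert (n : Int) (pathL n c), ?_, ?_⟩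
    · simp only [Prod.mk.injEq]
      refine ⟨?_, trivial, by push_cast; ring⟩
      rw [hget, PySem.List.pySetD_natCast, zero_add]
      apply List.ext_getElem (by simp)
      intro j hj1 hj2
      simp only [List.length_set, List.length_map, List.length_range] at hj1
      simp only [List.getElem_set, List.getElem_map, List.getElem_range]
      by_cases hjn : j = n
      · subst hjn; simp
      · rw [if_neg (fun h => hjn h.symm)]
        split_ifs with h1 h2 <;> first | rfl | omega
    · intro m hm
      by_cases hmn : m = n
      · subst hmn
        rw [PySem.Dict.getD_insert]
        simp
      · rw [PySem.Dict.getD_insert]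
        rw [if_neg (by exact_mod_cast hmn)]
        exact hd m (by omega)

-- characterization of calculate_cost()
theorem calc_spec (t b : List Int) (rest : List (List Int)) (c : Nat) :
    (gridGameCalc (t :: b :: rest) c).1 = (List.range c).map (Fc t b c) ∧
    (∀ m : Nat, m < c → (gridGameCalc (t :: b :: rest) c).2.getD (m : Int) [] = pathL m c) := by
  obtain ⟨d, heq, hd⟩ := calc_aux t b rest c c le_rfl
  unfold gridGameCalc
  rw [heq]
  constructor
  · apply List.map_congr_left
    intro m hm
    simp only [List.mem_range] at hm
    simp [hm]
  · exact hd

theorem zero_row0 (b : List Int) (rest : List (List Int)) (js : List Nat) :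
    ∀ t : List Int,
    ((js.map (fun j : Nat => ((0 : Int), (j : Int)))).foldl
      (fun g p => PySem.List.pySetD g p.1 (PySem.List.pySetD (PySem.List.pyGetD g p.1 []) p.2 0))
      (t :: b :: rest))
    = (js.foldl (fun l j => l.set j 0) t) :: b :: rest := by
  induction js with
  | nil => intro t; rfl
  | cons j js ih =>
    intro t
    simp only [List.map_cons, List.foldl_cons]
    have hstep : PySem.List.pySetD (t :: b :: rest) ((0 : Int), (j : Int)).1
          (PySem.List.pySetD (PySem.List.pyGetD (t :: b :: rest) ((0 : Int), (j : Int)).1 [])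
            ((0 : Int), (j : Int)).2 0)
        = (t.set j 0) :: b :: rest := by
      have h2 : PySem.List.pySetD (t :: b :: rest) ((0 : Nat) : Int) (t.set j 0)
          = (t.set j 0) :: b :: rest := by
        simpa using PySem.List.pySetD_natCast (t :: b :: rest) 0 (t.set j 0)
      simp only [PySem.List.pySetD_natCast, PySem.List.pyGetD_zero_cons]
      simpa using h2
    rw [hstep]
    exact ih (t.set j 0)

theorem zero_row1 (t : List Int) (rest : List (List Int)) (js : List Nat) :
    ∀ b : List Int,
    ((js.map (fun j : Nat => ((1 : Int), (j : Int)))).foldl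
      (fun g p => PySem.List.pySetD g p.1 (PySem.List.pySetD (PySem.List.pyGetD g p.1 []) p.2 0))
      (t :: b :: rest))
    = t :: (js.foldl (fun l j => l.set j 0) b) :: rest := by
  induction js with
  | nil => intro b; rfl
  | cons j js ih =>
    intro b
    simp only [List.map_cons, List.foldl_cons]
    have hstep : PySem.List.pySetD (t :: b :: rest) ((1 : Int), (j : Int)).1
          (PySem.List.pySetD (PySem.List.pyGetD (t :: b :: rest) ((1 : Int), (j : Int)).1 [])
            ((1 : Int), (j : Int)).2 0)
        = t :: (b.set j 0) :: rest := by
      have hb : PySem.List.pyGetD (t :: b :: rest) (1 : Int) [] = b := by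
        simpa using PySem.List.pyGetD_natCast (t :: b :: rest) 1 ([] : List Int)
      have hs : PySem.List.pySetD (t :: b :: rest) (1 : Int) (b.set j 0)
          = t :: (b.set j 0) :: rest := by
        simpa using PySem.List.pySetD_natCast (t :: b :: rest) 1 (b.set j 0)
      simp only [PySem.List.pySetD_natCast, hb]
      simpa using hs
    rw [hstep]
    exact ih (b.set j 0)

-- zeroing the cells of path k
theorem zero_spec (t b : List Int) (rest : List (List Int)) (k c : Nat) :
    (pathL k c).foldl
      (fun g p => PySem.List.pySetD g p.1 (PySem.List.pySetD (PySem.List.pyGetD g p.1 []) p.2 0))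
      (t :: b :: rest)
    = ((offR 0 (k + 1)).foldl (fun l j => l.set j 0) t) ::
      ((offR k (c - k)).foldl (fun l j => l.set j 0) b) :: rest := by
  rw [pathL, List.foldl_append, zero_row0, zero_row1]

theorem zset_getD (off n : Nat) (l : List Int) (m : Nat) :
    ((offR off n).foldl (fun l j => l.set j 0) l).getD m 0
    = if off ≤ m ∧ m < off + n then 0 else l.getD m 0 := by
  induction n generalizing m with
  | zero => simp [offR]
  | succ n ih =>
    rw [offR_succ_right, List.foldl_append]
    simp only [List.foldl_cons, List.foldl_nil]
    rw [getD_set_zero, ih]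
    split_ifs with h1 h2 h3 <;> first | rfl | omega

theorem take_getD (b : List Int) (c j : Nat) (hj : j < c) :
    (b.take c).getD j 0 = b.getD j 0 := by
  simp [List.getD, hj]

theorem take_sum (b : List Int) (c : Nat) (hcb : c ≤ b.length) :
    (b.take c).sum = seg b 0 c := by
  have : b.take c = (List.range c).map (fun m => b.getD m 0) := by
    apply List.ext_getElem (by simp; omega)
    intro j hj1 hj2
    rw [List.getElem_take, List.getElem_map, List.getElem_range]
    simp only [List.length_take] at hj1
    rw [List.getD, List.getElem?_eq_getElem (by omega)]
    rfl
  rw [this, seg]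
  simp

theorem bloop1_aux (t b : List Int) (c : Nat) (hc : 0 < c) (hcb : c ≤ b.length) :
    ∀ n : Nat, 1 ≤ n → n ≤ c →
    ∃ (M : Int) (kN : Nat), kN < n ∧ Fc t b c kN = M ∧
      (∀ j, j < n → Fc t b c j ≤ M) ∧ (∀ j, j < kN → Fc t b c j < M) ∧
      ((PySem.List.pyRange 0 (n : Int) 1).foldl
        (fun (st : Option Int × Int × Int × Int) i =>
          let pre := st.2.2.1 + PySem.List.pyGetD t i 0
          let cost := pre + st.2.2.2
          let suf := st.2.2.2 - PySem.List.pyGetD (PySem.List.slice b none (some (c : Int))) i 0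
          match st.1 with
          | none => (some cost, i, pre, suf)
          | some bb => if cost > bb then (some cost, i, pre, suf) else (st.1, st.2.1, pre, suf))
        (none, 0, 0, (PySem.List.slice b none (some (c : Int))).sum))
      = (some M, (kN : Int), seg t 0 n, seg b n c) := by
  have hslice : PySem.List.slice b none (some (c : Int)) = b.take c :=
    PySem.List.slice_to_natCast b c
  intro n hn1
  induction n, hn1 using Nat.le_induction with
  | base =>
    intro _
    refine ⟨Fc t b c 0, 0, by omega, rfl, ?_, by omega, ?_⟩
    · intro j hj
      interval_cases j
      exact le_rfl
    · rw [show ((1 : Nat) : Int) = 0 + 1 from by norm_num, PySem.List.pyRange_one_singleton,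
        List.foldl_cons, List.foldl_nil]
      dsimp only
      rw [PySem.List.pyGetD_zero t 0, hslice, PySem.List.pyGetD_zero _ 0,
        take_getD b c 0 (by omega), take_sum b c hcb]
      simp only [Prod.mk.injEq]
      refine ⟨?_, by norm_num, ?_, ?_⟩
      · rw [Fc, show seg t 0 1 = t.getD 0 0 from by simp [seg]]
        norm_num
      · rw [show seg t 0 1 = t.getD 0 0 from by simp [seg]]
        norm_num
      · rw [seg_cons b 0 c (by omega)]
        ring
  | succ n hn ih =>
    intro hnc
    obtain ⟨M, kN, hk1, hk2, hk3, hk4, heq⟩ := ih (by omega)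
    have hsplit : PySem.List.pyRange 0 ((n + 1 : Nat) : Int) 1
        = PySem.List.pyRange 0 (n : Int) 1 ++ [(n : Int)] := by
      rw [show ((n + 1 : Nat) : Int) = (n : Int) + 1 from by push_cast; ring]
      exact PySem.List.pyRange_one_succ_right (by positivity)
    rw [hsplit, List.foldl_append, heq, List.foldl_cons, List.foldl_nil]
    dsimp only
    rw [PySem.List.pyGetD_natCast t n 0, hslice, PySem.List.pyGetD_natCast _ n 0,
      take_getD b c n (by omega),
      ← seg_succ_right t 0 n (by omega),
      show seg b n c - b.getD n 0 = seg b (n + 1) c from by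
        rw [seg_cons b n c (by omega)]; ring]
    by_cases hcond : seg t 0 (n + 1) + seg b n c > M
    · refine ⟨seg t 0 (n + 1) + seg b n c, n, by omega, rfl, ?_, ?_, ?_⟩
      · intro j hj
        rcases Nat.lt_succ_iff_lt_or_eq.mp hj with hj' | hj'
        · exact le_of_lt (lt_of_le_of_lt (hk3 j hj') hcond)
        · subst hj'; exact le_rfl
      · intro j hj
        exact lt_of_le_of_lt (hk3 j hj) hcond
      · rw [if_pos hcond]
    · refine ⟨M, kN, by omega, hk2, ?_, hk4, ?_⟩
      · intro j hj
        rcases Nat.lt_succ_iff_lt_or_eq.mp hj with hj' | hj'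
        · exact hk3 j hj'
        · subst hj'; exact not_lt.mp hcond
      · rw [if_neg hcond]

-- B's first loop: first argmax of Fc
theorem bloop1 (t b : List Int) (c : Nat) (hc : 0 < c) (hcb : c ≤ b.length)
    (hct : c = t.length) :
    ∃ (M : Int) (kN : Nat), kN < c ∧ Fc t b c kN = M ∧
      (∀ j, j < c → Fc t b c j ≤ M) ∧ (∀ j, j < kN → Fc t b c j < M) ∧
      ((PySem.List.pyRange 0 (c : Int) 1).foldl
        (fun (st : Option Int × Int × Int × Int) i =>
          let pre := st.2.2.1 + PySem.List.pyGetD t i 0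
          let cost := pre + st.2.2.2
          let suf := st.2.2.2 - PySem.List.pyGetD (PySem.List.slice b none (some (c : Int))) i 0
          match st.1 with
          | none => (some cost, i, pre, suf)
          | some bb => if cost > bb then (some cost, i, pre, suf) else (st.1, st.2.1, pre, suf))
        (none, 0, 0, (PySem.List.slice b none (some (c : Int))).sum)).2.1 = (kN : Int) := by
  obtain ⟨M, kN, hk1, hk2, hk3, hk4, heq⟩ := bloop1_aux t b c hc hcb c (by omega) le_rfl
  exact ⟨M, kN, hk1, hk2, hk3, hk4, by rw [heq]⟩

-- B's countdown loop over range(k-1, -1, -1)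
theorem loop2 (bt : List Int) : ∀ (n : Nat) (ans s : Int),
    ∃ A S : Int,
      ((PySem.List.pyRange ((n : Int) - 1) (-1) (-1)).foldl
        (fun (st : Int × Int) i =>
          let ss := st.2 + PySem.List.pyGetD bt i 0
          (if ss > st.1 then ss else st.1, ss)) (ans, s)) = (A, S)
      ∧ ans ≤ A ∧ (∀ j, j < n → s + seg bt j n ≤ A)
      ∧ (A = ans ∨ ∃ j, j < n ∧ A = s + seg bt j n) := by
  intro n
  induction n with
  | zero =>
    intro ans s
    rw [show ((0 : Nat) : Int) - 1 = -1 from by norm_num,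
      PySem.List.pyRange_neg_one_eq_nil le_rfl]
    exact ⟨ans, s, rfl, le_rfl, by omega, Or.inl rfl⟩
  | succ n ih =>
    intro ans s
    have hcons : PySem.List.pyRange (((n + 1 : Nat) : Int) - 1) (-1) (-1)
        = (n : Int) :: PySem.List.pyRange ((n : Int) - 1) (-1) (-1) := by
      rw [show ((n + 1 : Nat) : Int) - 1 = (n : Int) from by push_cast; ring]
      exact PySem.List.pyRange_neg_one_cons (by omega)
    rw [hcons, List.foldl_cons]
    dsimp only
    rw [PySem.List.pyGetD_natCast bt n 0]
    obtain ⟨A, S, heq, h1, h2, h3⟩ := ih (if s + bt.getD n 0 > ans then s + bt.getD n 0 else ans)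
      (s + bt.getD n 0)
    refine ⟨A, S, heq, ?_, ?_, ?_⟩
    · exact le_trans (by split_ifs with h <;> omega) h1
    · intro j hj
      rcases Nat.lt_succ_iff_lt_or_eq.mp hj with hj' | hj'
      · have := h2 j hj'
        rw [seg_succ_right bt j n (by omega)]
        omega
      · subst hj'
        rw [seg_succ_right bt j j (by omega), seg_self, zero_add]
        have : s + bt.getD j 0 ≤ (if s + bt.getD j 0 > ans then s + bt.getD j 0 else ans) := by
          split_ifs with h <;> omega
        omega
    · rcases h3 with h | ⟨j, hj, hA⟩
      · by_cases hc : s + bt.getD n 0 > ans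
        · rw [h, if_pos hc]
          exact Or.inr ⟨n, by omega, by
            rw [seg_succ_right bt n n (by omega), seg_self, zero_add]⟩
        · rw [h, if_neg hc]
          exact Or.inl rfl
      · refine Or.inr ⟨j, by omega, ?_⟩
        rw [hA, seg_succ_right bt j n (by omega)]
        ring
-- B's forward loop over range(k+1, c)
theorem loop3 (tt : List Int) : ∀ (n : Nat) (a : Nat) (ans s : Int),
    ∃ A S : Int,
      ((PySem.List.pyRange (a : Int) ((a + n : Nat) : Int) 1).foldl
        (fun (st : Int × Int) i =>
          let ss := st.2 + PySem.List.pyGetD tt i 0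
          (if ss > st.1 then ss else st.1, ss)) (ans, s)) = (A, S)
      ∧ ans ≤ A ∧ (∀ j, a ≤ j → j < a + n → s + seg tt a (j + 1) ≤ A)
      ∧ (A = ans ∨ ∃ j, a ≤ j ∧ j < a + n ∧ A = s + seg tt a (j + 1)) := by
  intro n
  induction n with
  | zero =>
    intro a ans s
    rw [show ((a + 0 : Nat) : Int) = (a : Int) from by push_cast; ring,
      PySem.List.pyRange_one_eq_nil le_rfl]
    exact ⟨ans, s, rfl, le_rfl, by omega, Or.inl rfl⟩
  | succ n ih =>
    intro a ans s
    have hcons : PySem.List.pyRange (a : Int) ((a + (n + 1) : Nat) : Int) 1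
        = (a : Int) :: PySem.List.pyRange ((a : Int) + 1) ((a + (n + 1) : Nat) : Int) 1 :=
      PySem.List.pyRange_one_cons (by push_cast; omega)
    rw [hcons, List.foldl_cons]
    dsimp only
    rw [PySem.List.pyGetD_natCast tt a 0]
    obtain ⟨A, S, heq, h1, h2, h3⟩ := ih (a + 1)
      (if s + tt.getD a 0 > ans then s + tt.getD a 0 else ans) (s + tt.getD a 0)
    rw [show ((a : Int) + 1) = ((a + 1 : Nat) : Int) from by push_cast; ring,
      show ((a + (n + 1) : Nat) : Int) = (((a + 1) + n : Nat) : Int) from by push_cast; ring,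
      heq]
    have hseg : ∀ j, a + 1 ≤ j + 1 → seg tt a (j + 1) = tt.getD a 0 + seg tt (a + 1) (j + 1) :=
      fun j hj => seg_cons tt a (j + 1) (by omega)
    refine ⟨A, S, rfl, ?_, ?_, ?_⟩
    · exact le_trans (by split_ifs with h <;> omega) h1
    · intro j hja hj
      rcases Nat.lt_or_ge j (a + 1) with hj' | hj'
      · have hja' : j = a := by omega
        subst hja'
        rw [seg_cons tt j (j + 1) (by omega), seg_self, add_zero]
        have : s + tt.getD j 0 ≤ (if s + tt.getD j 0 > ans then s + tt.getD j 0 else ans) := by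
          split_ifs with h <;> omega
        omega
      · have := h2 j hj' (by omega)
        rw [hseg j (by omega)]
        omega
    · rcases h3 with h | ⟨j, hj1, hj2, hA⟩
      · by_cases hc : s + tt.getD a 0 > ans
        · rw [h, if_pos hc]
          refine Or.inr ⟨a, le_rfl, by omega, ?_⟩
          rw [seg_cons tt a (a + 1) (by omega), seg_self, add_zero]
        · rw [h, if_neg hc]
          exact Or.inl rfl
      · refine Or.inr ⟨j, by omega, by omega, ?_⟩
        rw [hA, hseg j (by omega)]
        ring

-- first occurrence of the maximum in a mapped range
theorem index_first_max (F : Nat → Int) (c kN : Nat) (hk : kN < c) (M : Int)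
    (hFk : F kN = M) (hlt : ∀ j, j < kN → F j < M) :
    PySem.List.index? ((List.range c).map F) M = some kN := by
  obtain ⟨d, rfl⟩ : ∃ d, c = kN + (d + 1) := ⟨c - kN - 1, by omega⟩
  rw [PySem.List.index?_eq_some_iff]
  refine ⟨(List.range kN).map F, (List.range d).map (fun m => F (kN + 1 + m)),
    ?_, by simp, ?_⟩
  · rw [List.range_add, List.map_append]
    congr 1
    rw [List.range_succ_eq_map]
    simp only [List.map_cons, List.map_map, Function.comp_def, Nat.add_zero, hFk]
    congr 1
    apply List.map_congr_left
    intro m _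
    congr 1
    omega
  · intro hmem
    simp only [List.mem_map, List.mem_range] at hmem
    obtain ⟨j, hj, hFj⟩ := hmem
    exact absurd hFj (ne_of_lt (hlt j hj))

-- ===== VERDICT (by name: the statement is the Claim_ definition above) =====
theorem gridGame_spec : Claim_equal_gridGame := by
  intro grid _hdom hpre
  unfold Spec_gridGame
  obtain ⟨t, g2⟩ : ∃ t g2, grid = t :: g2 := by
    cases grid with
    | nil => exact absurd hpre.1 (by simp)
    | cons t g2 => exact ⟨t, g2, rfl⟩
  obtain ⟨g2, rfl⟩ := g2
  obtain ⟨b, rest, rfl⟩ : ∃ b rest, g2 = b :: rest := by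
    cases g2 with
    | nil => exact absurd hpre.1 (by simp)
    | cons b rest => exact ⟨b, rest, rfl⟩
  have hc : 1 ≤ t.length := by simpa using hpre.2.1
  have hcb : t.length ≤ b.length := by simpa using hpre.2.2
  have hb1 : PySem.List.pyGetD (t :: b :: rest) (1 : Int) [] = b := by
    simpa using PySem.List.pyGetD_natCast (t :: b :: rest) 1 ([] : List Int)
  unfold gridGame gridGame_alt
  simp only [PySem.List.pyGetD_zero_cons, hb1]
  set c := t.length with hcdef
  -- characterize the first calculate_cost
  obtain ⟨hcost1, hpaths1⟩ := calc_spec t b rest c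
  rw [hcost1]
  -- B's first loop gives the first argmax kN of Fc
  obtain ⟨M, kN, hk1, hk2, hk3, hk4, hblo⟩ :=
    bloop1 t b c (by omega) hcb rfl
  rw [hblo]
  -- A's max over the first cost list is M
  have hne : (List.range c).map (Fc t b c) ≠ [] := by
    simp only [ne_eq, List.map_eq_nil_iff, List.range_eq_nil]
    omega
  have hmax : PySem.List.max? ((List.range c).map (Fc t b c)) (fun x => x) = some M := by
    cases hmx : PySem.List.max? ((List.range c).map (Fc t b c)) (fun x => x) with
    | none => exact absurd ((PySem.List.max?_eq_none_iff _ _).mp hmx) hne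
    | some m =>
      have hmem := PySem.List.max?_mem hmx
      have hisM := PySem.List.max?_isMax hmx
      simp only [List.mem_map, List.mem_range] at hmem
      obtain ⟨j, hj, hFj⟩ := hmem
      have h1 : m ≤ M := hFj ▸ hk3 j hj
      have h2 : M ≤ m := by
        have := hisM (Fc t b c kN) (List.mem_map_of_mem (List.mem_range.mpr hk1))
        simpa [hk2] using this
      rw [le_antisymm h1 h2]
  rw [hmax]
  simp only [Option.getD_some]
  rw [index_first_max (Fc t b c) c kN hk1 M hk2 hk4]
  simp only [Option.getD_some]
  rw [hpaths1 kN hk1, zero_spec t b rest kN c]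
  set zt := (offR 0 (kN + 1)).foldl (fun l j => l.set j 0) t with hzt
  set zb := (offR kN (c - kN)).foldl (fun l j => l.set j 0) b with hzb
  obtain ⟨hcost2, _⟩ := calc_spec zt zb rest c
  rw [hcost2]
  -- the second cost list is Gf
  have hGf : ∀ i, i < c → Fc zt zb c i = Gf t b kN i := by
    intro i hi
    have hztD : ∀ m : Nat, zt.getD m 0 = if m < kN + 1 then 0 else t.getD m 0 := by
      intro m
      rw [hzt, zset_getD 0 (kN + 1) t m]
      split_ifs with h1 h2 h3 <;> first | rfl | omega
    have hzbD : ∀ m : Nat, zb.getD m 0 = if kN ≤ m ∧ m < c then 0 else b.getD m 0 := by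
      intro m
      rw [hzb, zset_getD kN (c - kN) b m]
      split_ifs with h1 h2 h3 <;> first | rfl | omega
    rw [Fc, Gf]
    by_cases hik : i ≤ kN
    · rw [if_pos hik]
      rw [seg_zero_of zt 0 (i + 1) (fun m _ hm2 => by rw [hztD]; rw [if_pos (by omega)]),
        seg_split zb i kN c hik (by omega),
        seg_congr zb b i kN (fun m hm1 hm2 => by rw [hzbD, if_neg (by omega)]),
        seg_zero_of zb kN c (fun m hm1 hm2 => by rw [hzbD, if_pos (by omega)])]
      ring
    · rw [if_neg hik]
      rw [seg_split zt 0 (kN + 1) (i + 1) (by omega) (by omega),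
        seg_zero_of zt 0 (kN + 1) (fun m _ hm2 => by rw [hztD, if_pos (by omega)]),
        seg_congr zt t (kN + 1) (i + 1) (fun m hm1 hm2 => by rw [hztD, if_neg (by omega)]),
        seg_zero_of zb i c (fun m hm1 hm2 => by rw [hzbD, if_pos (by omega)])]
      ring
  have hlist2 : (List.range c).map (Fc zt zb c) = (List.range c).map (Gf t b kN) := by
    apply List.map_congr_left
    intro i hi
    exact hGf i (List.mem_range.mp hi)
  rw [hlist2]
  -- B's second and third loops
  have hslice : PySem.List.slice b none (some (c : Int)) = b.take c :=
    PySem.List.slice_to_natCast b c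
  have hsegbt : ∀ j k' : Nat, k' ≤ c →
      seg (PySem.List.slice b none (some (c : Int))) j k' = seg b j k' := by
    intro j k' h
    rw [hslice]
    exact seg_congr _ b j k' (fun m _ hm2 => take_getD b c m (by omega))
  obtain ⟨A2, S2, heq2, hl2a, hl2b, hl2c⟩ :=
    loop2 (PySem.List.slice b none (some (c : Int))) kN 0 0
  rw [heq2]
  have hbound3 : ((c : Nat) : Int) = (((kN + 1) + (c - kN - 1) : Nat) : Int) := by
    push_cast; omega
  obtain ⟨A3, S3, heq3, hl3a, hl3b, hl3c⟩ := loop3 t (c - kN - 1) (kN + 1) A2 0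
  rw [show ((kN : Nat) : Int) + 1 = (((kN + 1 : Nat)) : Int) from by push_cast; ring,
    hbound3, heq3]
  -- every remaining path cost is at most A3
  have hG_le : ∀ i, i < c → Gf t b kN i ≤ A3 := by
    intro i hi
    by_cases hik : i ≤ kN
    · rw [Gf, if_pos hik]
      rcases Nat.lt_or_ge i kN with h | h
      · have := hl2b i h
        rw [hsegbt i kN (by omega)] at this
        omega
      · have hik' : i = kN := by omega
        subst hik'
        rw [seg_self]
        omega
    · rw [Gf, if_neg hik]
      have := hl3b i (by omega) (by omega)
      simpa using this
  -- A3 is one of the remaining path costs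
  have hA3_isG : ∃ i, i < c ∧ A3 = Gf t b kN i := by
    rcases hl3c with h | ⟨j, hj1, hj2, hA⟩
    · rcases hl2c with h' | ⟨j, hj, hA⟩
      · refine ⟨kN, hk1, ?_⟩
        rw [h, h', Gf, if_pos le_rfl, seg_self]
      · refine ⟨j, by omega, ?_⟩
        rw [h, hA, Gf, if_pos (by omega), hsegbt j kN (by omega), zero_add]
    · refine ⟨j, by omega, ?_⟩
      rw [hA, Gf, if_neg (by omega), zero_add]
  -- A's second max equals A3
  cases hmx2 : PySem.List.max? ((List.range c).map (Gf t b kN)) (fun x => x) with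
  | none =>
    refine absurd ((PySem.List.max?_eq_none_iff _ _).mp hmx2) ?_
    simp only [List.map_eq_nil_iff, List.range_eq_nil]
    omega
  | some A0 =>
    have hmem := PySem.List.max?_mem hmx2
    have hisM := PySem.List.max?_isMax hmx2
    simp only [List.mem_map, List.mem_range] at hmem
    obtain ⟨j, hj, hFj⟩ := hmem
    obtain ⟨i, hi, hA3⟩ := hA3_isG
    have h1 : A0 ≤ A3 := hFj ▸ hG_le j hj
    have h2 : A3 ≤ A0 := by
      have := hisM (Gf t b kN i) (List.mem_map_of_mem (List.mem_range.mpr hi))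
      simpa [← hA3] using this
    simpa using le_antisymm h1 h2
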